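-- pv_equiv track=rewrite | github.com/jmb163/xbrl-parser | reports_getter.py | cleanse
-- ===== SOURCE A (Python) =====
-- def cleanse(s):
-- 	rev = s[::-1]
-- 	work = ""
-- 	found_capital = False
-- 	for letter in rev:
-- 		cap = letter.isupper()
-- 		if cap and not found_capital:
-- 			work += letter
-- 			found_capital = True
-- 		elif cap and found_capital:
-- 			continue
-- 		else:
-- 			found_capital = False
-- 			work += letter
-- 	work = work[::-1]
-- 	for i in range(0, len(work)):
-- 		if work[i].isupper():
-- 			return work[i:]
-- ===== SOURCE B (Python) =====
-- def cleanse(s):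
--     # single forward pass: collapse each maximal uppercase run to its last
--     # character, then return the suffix from the first remaining capital
--     parts = []
--     i = 0
--     n = len(s)
--     while i < n:
--         k = s[i].isupper()
--         j = i
--         while j < n and s[j].isupper() == k:
--             j += 1
--         if k:
--             parts.append(s[j - 1])
--         else:
--             parts.append(s[i:j])
--         i = j
--     work = "".join(parts)
--     for i, c in enumerate(work):
--         if c.isupper():
--             return work[i:]
--     return None
-- ===== Notes on version B (the rewrite author's own statement) =====
-- stated objective: idiomatic
-- what changed: Replaced the double string reversal plus found_capital state machine by a single forward grouping pass that collapses each maximal uppercase run to its last character, followed by a suffix-from-first-capital scan.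
import Mathlib
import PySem

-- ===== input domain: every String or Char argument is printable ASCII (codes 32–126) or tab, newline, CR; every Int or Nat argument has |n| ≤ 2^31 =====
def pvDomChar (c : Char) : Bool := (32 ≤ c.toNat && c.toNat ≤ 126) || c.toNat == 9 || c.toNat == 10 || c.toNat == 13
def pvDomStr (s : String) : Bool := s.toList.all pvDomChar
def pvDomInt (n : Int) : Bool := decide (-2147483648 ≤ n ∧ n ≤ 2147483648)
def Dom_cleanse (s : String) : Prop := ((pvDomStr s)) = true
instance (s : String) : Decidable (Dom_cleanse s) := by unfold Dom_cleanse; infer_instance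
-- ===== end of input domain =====

-- B replaces A's double reversal + found_capital state machine by one forward
-- grouping pass (collapse each maximal uppercase run to its last character)
-- followed by a suffix-from-first-capital scan; objective: idiomatic.

-- ===== PORT A =====
-- strings handled as List Char; s[::-1] is toList.reverse (exact); work += letter is list append
def cleanseStepA (st : List Char × Bool) (letter : Char) : List Char × Bool :=
  let cap := letter.isUpper
  if cap && !st.2 then (st.1 ++ [letter], true)
  else if cap && st.2 then st
  else (st.1 ++ [letter], false)

-- A's final index loop: for i in range(0, len(work)): if work[i].isupper(): return work[i:]
def cleanseFindA (work : List Char) (i : Nat) : Option String :=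
  if h : i < work.length then
    if (work[i]).isUpper then some (String.mk (work.drop i))
    else cleanseFindA work (i + 1)
  else none
termination_by work.length - i

def cleanse (s : String) : Option String :=
  let rev := s.toList.reverse
  let st := rev.foldl cleanseStepA ([], false)
  let work := st.1.reverse
  cleanseFindA work 0

-- ===== PORT B =====
-- the inner while-scan of Source B taking one maximal same-key group at a time
def collapseB (cs : List Char) : List Char :=
  match cs with
  | [] => []
  | c :: rest =>
    let k := c.isUpper
    let grp := rest.takeWhile (fun d => d.isUpper == k)
    let rest' := rest.dropWhile (fun d => d.isUpper == k)
    (if k then [(c :: grp).getLast (by simp)] else c :: grp) ++ collapseB rest'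
termination_by cs.length
decreasing_by
  simp only [List.length_cons]
  exact Nat.lt_succ_of_le (List.length_dropWhile_le _ _)

def cleanse_alt (s : String) : Option String :=
  let work := collapseB s.toList
  let t := work.dropWhile (fun c => !c.isUpper)
  if t.isEmpty then none else some (String.mk t)

-- ===== PRECONDITION & SPEC =====
def Spec_cleanse (s : String) (out : Option String) : Prop := out = cleanse_alt s
instance (s : String) (out : Option String) : Decidable (Spec_cleanse s out) := by unfold Spec_cleanse; infer_instance

-- ===== CLAIM (what is proved, stated in full; the proofs are below) =====
def Claim_equal_cleanse : Prop := ∀ (s : String), Dom_cleanse s → Spec_cleanse s (cleanse s)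

-- ===== LEMMAS AND PROOFS =====

-- reference collapse: drop an uppercase char whose successor is also uppercase
def nextUpper (cs : List Char) : Bool :=
  match cs with
  | [] => false
  | d :: _ => d.isUpper

def collapseF : List Char → List Char
  | [] => []
  | c :: cs => if c.isUpper && nextUpper cs then collapseF cs else c :: collapseF cs

-- A's first loop, processing the reversed string with the found_capital flag
def hA : List Char → Bool → List Char
  | [], _ => []
  | c :: cs, b =>
    if c.isUpper then (if b then hA cs true else c :: hA cs true)
    else c :: hA cs false

def flA : List Char → Bool → Bool
  | [], b => b
  | c :: cs, _ => flA cs c.isUpper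

theorem foldlA_spec (cs : List Char) (acc : List Char) (b : Bool) :
    cs.foldl cleanseStepA (acc, b) = (acc ++ hA cs b, flA cs b) := by
  induction cs generalizing acc b with
  | nil => simp [hA, flA]
  | cons c cs ih =>
    by_cases hc : c.isUpper
    · cases b <;>
        simp [List.foldl_cons, cleanseStepA, hc, hA, flA, ih, List.append_assoc]
    · simp [List.foldl_cons, cleanseStepA, hc, hA, flA, ih, List.append_assoc]

theorem flA_append (l : List Char) (x : Char) (b : Bool) :
    flA (l ++ [x]) b = x.isUpper := by
  induction l generalizing b with
  | nil => simp [flA]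
  | cons c cs ih => simp [flA, ih]

theorem hA_append (l : List Char) (x : Char) (b : Bool) :
    hA (l ++ [x]) b =
      hA l b ++ (if x.isUpper && flA l b then [] else [x]) := by
  induction l generalizing b with
  | nil => cases hx : x.isUpper <;> simp [hA, flA, hx]
  | cons c cs ih =>
    by_cases hc : c.isUpper
    · cases b <;> simp [hA, flA, hc, ih]
    · simp [hA, flA, hc, ih]

theorem flA_reverse (cs : List Char) :
    flA cs.reverse false = nextUpper cs := by
  cases cs with
  | nil => simp [flA, nextUpper]
  | cons c cs => simpa [nextUpper] using flA_append cs.reverse c false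

theorem hA_reverse (cs : List Char) :
    (hA cs.reverse false).reverse = collapseF cs := by
  induction cs with
  | nil => simp [hA, collapseF]
  | cons c cs ih =>
    have h1 : (c :: cs).reverse = cs.reverse ++ [c] := by simp
    rw [h1, hA_append, flA_reverse, collapseF]
    by_cases hc : c.isUpper && nextUpper cs
    · simp [hc, ih]
    · simp [hc, ih]

theorem collapseF_cons2 (c d : Char) (cs : List Char) :
    collapseF (c :: d :: cs) =
      if c.isUpper && d.isUpper then collapseF (d :: cs)
      else c :: collapseF (d :: cs) := by
  rw [collapseF]; simp [nextUpper]

theorem collapseB_eq (cs : List Char) : collapseB cs = collapseF cs := by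
  induction hn : cs.length using Nat.strong_induction_on generalizing cs with
  | _ n ih =>
  match cs, hn with
  | [], _ => simp [collapseB, collapseF]
  | [c], hn =>
    cases hc : c.isUpper <;> simp [collapseB, collapseF, nextUpper, hc]
  | c :: d :: cs, hn =>
    have h2 : collapseB (d :: cs) = collapseF (d :: cs) :=
      ih (d :: cs).length (by simp [← hn]) _ rfl
    rw [collapseF_cons2, ← h2]
    by_cases hc : c.isUpper
    · by_cases hd : d.isUpper
      · simp only [hc, hd, Bool.and_self, if_true]
        rw [collapseB, collapseB]
        simp [hc, hd, List.takeWhile_cons, List.dropWhile_cons,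
          List.getLast_cons]
      · simp only [hc, hd, Bool.and_false, if_false, Bool.false_and]
        rw [collapseB]
        simp [hc, hd, List.takeWhile_cons, List.dropWhile_cons]
    · simp only [hc, Bool.false_and, if_false]
      by_cases hd : d.isUpper
      · rw [collapseB]
        simp [hc, hd, List.takeWhile_cons, List.dropWhile_cons]
      · conv_rhs => rw [collapseB]
        rw [collapseB]
        simp [hc, hd, List.takeWhile_cons, List.dropWhile_cons]

theorem cleanseFindA_spec (work : List Char) (i : Nat) :
    cleanseFindA work i =
      (let t := (work.drop i).dropWhile (fun c => !c.isUpper);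
       if t.isEmpty then none else some (String.mk t)) := by
  induction hn : work.length - i using Nat.strong_induction_on generalizing i with
  | _ n ih =>
  rw [cleanseFindA]
  by_cases h : i < work.length
  · have hdrop : work.drop i = work[i] :: work.drop (i + 1) :=
      (List.drop_eq_getElem_cons h)
    by_cases hu : (work[i]).isUpper
    · rw [dif_pos h, if_pos hu, hdrop]
      simp only [List.dropWhile_cons, hu, Bool.not_true, List.isEmpty_cons]
      rfl
    · have hrec := ih (work.length - (i + 1)) (by omega) (i + 1) rfl
      rw [dif_pos h, if_neg hu, hdrop] at *
      simpa only [List.dropWhile_cons, hu, Bool.not_false, if_true] using hrec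
  · simp [h, List.drop_eq_nil_of_le (by omega : work.length ≤ i)]

-- ===== VERDICT (by name: the statement is the Claim_ definition above) =====
theorem cleanse_spec : Claim_equal_cleanse := by
  intro s _
  unfold Spec_cleanse cleanse cleanse_alt
  simp only [foldlA_spec, List.nil_append]
  rw [hA_reverse, ← collapseB_eq, cleanseFindA_spec]
  simp
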